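-- pv_equiv track=rewrite | github.com/Sciemon/powerfactorypy | src/main.py | delete_chars_between_dot_and_slash
-- ===== SOURCE A (Python) =====
-- def delete_chars_between_dot_and_slash(string):
--   """
--   Deletes all characters between '.' and ''.
--   Example:
--     input:  "User.IntUser\\Project name.IntPrj\\Network Data.IntPrjfolder\\Grid.ElmNet\\With Selflim.ElmComp\\Control.ElmDsl.2"
--     output: "Network Data\\Grid\With Selflim\\Control"
--   Characters after the last '.' are also deleted.
--   Note that '.' are deleted, wheras '\\' are kept.
--   """
--   is_between_dot_and_slash = False
--   string_new = ""
--   for c in string: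
--       if c == '.':
--         is_between_dot_and_slash = True
--       elif c == '\\':
--         is_between_dot_and_slash = False
--         string_new = string_new + c
--       elif not is_between_dot_and_slash:
--         string_new = string_new + c
--   return string_new
-- ===== SOURCE B (Python) =====
-- def delete_chars_between_dot_and_slash(string):
--     return "\\".join(part.split(".")[0] for part in string.split("\\"))
-- ===== Notes on version B (the rewrite author's own statement) =====
-- stated objective: idiomatic
-- what changed: Replaces A's char-by-char state-machine scan (with quadratic string concatenation) by a split-on-backslash / keep-text-before-first-dot / join pipeline.
import Mathlib
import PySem

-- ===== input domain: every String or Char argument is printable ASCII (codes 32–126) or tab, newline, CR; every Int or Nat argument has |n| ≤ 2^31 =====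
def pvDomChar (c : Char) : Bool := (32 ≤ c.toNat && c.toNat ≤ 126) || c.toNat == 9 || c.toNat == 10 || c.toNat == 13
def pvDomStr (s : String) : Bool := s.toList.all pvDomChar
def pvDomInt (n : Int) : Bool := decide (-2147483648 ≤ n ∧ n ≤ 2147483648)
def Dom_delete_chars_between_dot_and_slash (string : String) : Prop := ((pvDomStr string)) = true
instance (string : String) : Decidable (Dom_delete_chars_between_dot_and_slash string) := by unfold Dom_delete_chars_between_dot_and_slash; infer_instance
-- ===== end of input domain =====

-- B replaces A's char-by-char state-machine scan with an idiomatic split/map/join pipeline; same return value, proved equal on all strings.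

-- ===== PORT A =====
-- A's loop body: state = (is_between_dot_and_slash, string_new), one step per character.
def pvAStep (st : Bool × List Char) (c : Char) : Bool × List Char :=
  if c = '.' then (true, st.2)
  else if c = '\\' then (false, st.2 ++ [c])
  else if !st.1 then (st.1, st.2 ++ [c])
  else st

def delete_chars_between_dot_and_slash (string : String) : String :=
  String.mk (string.toList.foldl pvAStep (false, [])).2

-- ===== PORT B =====
-- part.split(".")[0]  (split always returns a nonempty list, so [0] is its head)
def pvSegKeep (part : List Char) : List Char := (List.splitOn '.' part).headI

-- "\\".join(part.split(".")[0] for part in string.split("\\"))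
def delete_chars_between_dot_and_slash_alt (string : String) : String :=
  String.mk (List.intercalate ['\\'] ((string.toList.splitOn '\\').map pvSegKeep))

-- ===== PRECONDITION & SPEC =====
def Spec_delete_chars_between_dot_and_slash (string : String) (out : String) : Prop := out = delete_chars_between_dot_and_slash_alt string
instance (string : String) (out : String) : Decidable (Spec_delete_chars_between_dot_and_slash string out) := by unfold Spec_delete_chars_between_dot_and_slash; infer_instance

-- ===== CLAIM (what is proved, stated in full; the proofs are below) =====
def Claim_equal_delete_chars_between_dot_and_slash : Prop := ∀ (string : String), Dom_delete_chars_between_dot_and_slash string → Spec_delete_chars_between_dot_and_slash string (delete_chars_between_dot_and_slash string)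

-- ===== LEMMAS AND PROOFS =====

-- Recursive characterisation of A's scan from a given flag state.
def pvRun : Bool → List Char → List Char
  | _, [] => []
  | b, c :: cs =>
    if c = '.' then pvRun true cs
    else if c = '\\' then '\\' :: pvRun false cs
    else if !b then c :: pvRun b cs
    else pvRun b cs

theorem pvFoldl_aStep (cs : List Char) : ∀ (b : Bool) (acc : List Char),
    (cs.foldl pvAStep (b, acc)).2 = acc ++ pvRun b cs := by
  induction cs with
  | nil => intro b acc; simp [pvRun]
  | cons c cs ih =>
    intro b acc
    by_cases h1 : c = '.'
    · simp [pvAStep, pvRun, h1, ih]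
    · by_cases h2 : c = '\\'
      · simp [pvAStep, pvRun, h2, ih]
      · cases b <;> simp [pvAStep, pvRun, h1, h2, ih]

theorem pvSegKeep_nil : pvSegKeep [] = [] := by
  simp [pvSegKeep, List.splitOn, List.splitOnP_nil]

theorem pvSegKeep_dot (p : List Char) : pvSegKeep ('.' :: p) = [] := by
  simp [pvSegKeep, List.splitOn, List.splitOnP_cons]

theorem pvSegKeep_cons (c : Char) (p : List Char) (h : c ≠ '.') :
    pvSegKeep (c :: p) = c :: pvSegKeep p := by
  simp only [pvSegKeep, List.splitOn, List.splitOnP_cons]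
  rcases hs : List.splitOnP (fun x => x == '.') p with _ | ⟨hd, tl⟩
  · exact absurd hs (List.splitOnP_ne_nil _ p)
  · simp [h]

theorem pv_ic_cons (sep a : List Char) (x : List Char) (l : List (List Char)) :
    List.intercalate sep ((a ++ x) :: l) = a ++ List.intercalate sep (x :: l) := by
  cases l <;> simp [List.intercalate, List.intersperse]

-- Main invariant: A's scan from flag b equals B's pipeline, where flag true blanks the
-- still-pending head segment.
theorem pvRun_eq_pipeline (cs : List Char) : ∀ (b : Bool),
    pvRun b cs = List.intercalate ['\\']
      (if b then [] :: ((cs.splitOn '\\').tail.map pvSegKeep)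
       else (cs.splitOn '\\').map pvSegKeep) := by
  induction cs with
  | nil =>
    intro b
    cases b <;> simp [pvRun, List.splitOn, List.splitOnP_nil, pvSegKeep_nil, List.intercalate]
  | cons c cs ih =>
    intro b
    rcases hs : List.splitOnP (fun x => x == '\\') cs with _ | ⟨hd, tl⟩
    · exact absurd hs (List.splitOnP_ne_nil _ cs)
    have hfalse := ih false
    have htrue := ih true
    simp [List.splitOn, hs] at hfalse htrue
    by_cases h2 : c = '\\'
    · subst h2
      have key : List.intercalate ['\\'] ([] :: pvSegKeep hd :: tl.map pvSegKeep)
          = '\\' :: List.intercalate ['\\'] (pvSegKeep hd :: tl.map pvSegKeep) := by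
        simp [List.intercalate, List.intersperse]
      cases b <;>
        simp [pvRun, List.splitOn, List.splitOnP_cons, hs, pvSegKeep_nil, key, hfalse]
    · by_cases h1 : c = '.'
      · subst h1
        cases b <;>
          simp [pvRun, List.splitOn, List.splitOnP_cons, hs, pvSegKeep_dot, htrue]
      · have hseg := pvSegKeep_cons c hd h1
        have hic : List.intercalate ['\\'] ((c :: pvSegKeep hd) :: tl.map pvSegKeep)
            = c :: List.intercalate ['\\'] (pvSegKeep hd :: tl.map pvSegKeep) := by
          have := pv_ic_cons ['\\'] [c] (pvSegKeep hd) (tl.map pvSegKeep)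
          simpa using this
        cases b <;>
          simp [pvRun, h1, h2, List.splitOn, List.splitOnP_cons, hs, hseg, hic, hfalse, htrue]

-- ===== VERDICT (by name: the statement is the Claim_ definition above) =====
theorem delete_chars_between_dot_and_slash_spec : Claim_equal_delete_chars_between_dot_and_slash := by
  intro s _
  show _ = _
  unfold delete_chars_between_dot_and_slash delete_chars_between_dot_and_slash_alt
  rw [pvFoldl_aStep, List.nil_append, pvRun_eq_pipeline]
  simp
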